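-- pv_equiv track=rewrite | github.com/qiqi-impact/cp | leetcode/2282.py | seePeople
-- ===== SOURCE A (Python) =====
-- from typing import List
--
-- def seePeople(heights: List[List[int]]) -> List[List[int]]:
--     R, C = len(heights), len(heights[0])
--     ret = [[0 for _ in range(C)] for _ in range(R)]
--     for i in range(R-1, -1, -1):
--         stack = []
--         for j in range(C-1, -1, -1):
--             while stack and heights[i][stack[-1]] < heights[i][j]:
--                 stack.pop()
--                 ret[i][j] += 1
--             if stack:
--                 ret[i][j] += 1
--             if not stack or heights[i][stack[-1]] != heights[i][j]:
--                 stack.append(j)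
--     for j in range(C-1, -1, -1):
--         stack = []
--         for i in range(R-1, -1, -1):
--             while stack and heights[stack[-1]][j] < heights[i][j]:
--                 stack.pop()
--                 ret[i][j] += 1
--             if stack:
--                 ret[i][j] += 1
--             if not stack or heights[stack[-1]][j] != heights[i][j]:
--                 stack.append(i)
--     return ret
-- ===== SOURCE B (Python) =====
-- from typing import List
--
-- def seePeople(heights: List[List[int]]) -> List[List[int]]:
--     # Brute-force rescan with a running in-between maximum instead of monotonic stacks.
--     # The grid width is set by the first row.
--     C = len(heights[0])
--
--     def vis(line, j):
--         # number of people visible from position j looking towards the end of `line`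
--         c, mx = 0, None
--         for x in line[j + 1:]:
--             if mx is None or x > mx:
--                 c += 1
--                 mx = x
--             if mx >= line[j]:
--                 break
--         return c
--
--     rows = [row[:C] for row in heights]
--     cols = [[row[j] for row in rows] for j in range(C)]
--     return [[vis(row, j) + vis(cols[j], i) for j in range(C)]
--             for i, row in enumerate(rows)]
-- ===== Notes on version B (the rewrite author's own statement) =====
-- stated objective: simpler
-- what changed: Replaces A's two monotonic-stack sweeps over a mutable result matrix with a direct per-cell rescan: for each cell, scan right (and down) within the width set by the first row, keeping a running in-between maximum, counting each new maximum and stopping at the first blocker at least as tall.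
import Mathlib
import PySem

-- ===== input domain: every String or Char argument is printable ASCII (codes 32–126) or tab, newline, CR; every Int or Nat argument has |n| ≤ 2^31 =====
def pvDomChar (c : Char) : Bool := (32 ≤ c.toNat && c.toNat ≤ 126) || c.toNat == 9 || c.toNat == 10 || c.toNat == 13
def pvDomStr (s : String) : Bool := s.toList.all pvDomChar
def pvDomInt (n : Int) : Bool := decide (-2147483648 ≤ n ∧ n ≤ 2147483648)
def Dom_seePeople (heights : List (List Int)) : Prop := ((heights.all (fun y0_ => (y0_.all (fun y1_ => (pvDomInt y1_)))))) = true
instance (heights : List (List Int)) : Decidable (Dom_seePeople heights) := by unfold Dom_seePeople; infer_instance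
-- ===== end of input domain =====

-- B replaces A's two monotonic-stack sweeps by per-cell rescans with a running in-between maximum (objective: simpler).

-- ===== PORT A =====
-- heights[i][t] (indices are in range on every admitted input, so the default is never used)
def pvGet2 (hs : List (List Int)) (i t : Int) : Int :=
  PySem.List.pyGetD (PySem.List.pyGetD hs i []) t 0

-- ret[i][j] += 1  (i, j come from range(...) so they are ≥ 0; toNat is exact there)
def pvBumpAt (m : List (List Int)) (i j : Int) : List (List Int) :=
  m.modify i.toNat (fun row => row.modify j.toNat (· + 1))

-- the 'while stack and <height at stack[-1]> < <height at j>' loop; stack top is the list head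
def pvPop (val : Int → Int) (bump : List (List Int) → Int → List (List Int)) (j : Int) :
    List Int → List (List Int) → List Int × List (List Int)
  | [], ret => ([], ret)
  | t :: st, ret =>
    if val t < val j then pvPop val bump j st (bump ret j) else (t :: st, ret)

-- one iteration of the inner loop; both sweeps of A share this shape, parameterised by
-- how a height is read (val) and where ret is incremented (bump)
def pvBody (val : Int → Int) (bump : List (List Int) → Int → List (List Int))
    (s : List (List Int) × List Int) (j : Int) : List (List Int) × List Int :=
  let p := pvPop val bump j s.2 s.1
  let ret1 := if p.1.isEmpty then p.2 else bump p.2 j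
  let st1 := if p.1.isEmpty || !(val (p.1.headD 0) == val j) then j :: p.1 else p.1
  (ret1, st1)

def seePeople (heights : List (List Int)) : List (List Int) :=
  let R : Int := heights.length
  let C : Int := (PySem.List.pyGetD heights 0 []).length
  let ret0 := (PySem.List.pyRange 0 R 1).map (fun _ => (PySem.List.pyRange 0 C 1).map (fun _ => (0 : Int)))
  let ret1 := (PySem.List.pyRange (R - 1) (-1) (-1)).foldl
    (fun ret i =>
      ((PySem.List.pyRange (C - 1) (-1) (-1)).foldl
        (pvBody (fun t => pvGet2 heights i t) (fun m j => pvBumpAt m i j)) (ret, [])).1) ret0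
  (PySem.List.pyRange (C - 1) (-1) (-1)).foldl
    (fun ret j =>
      ((PySem.List.pyRange (R - 1) (-1) (-1)).foldl
        (pvBody (fun t => pvGet2 heights t j) (fun m i => pvBumpAt m i j)) (ret, [])).1) ret1

-- ===== PORT B =====
-- the scan 'for x in line[j+1:]' with running maximum mx and early break
def pvVisGo (hj : Int) : List Int → Option Int → Int
  | [], _ => 0
  | x :: rest, none => if hj ≤ x then 1 else 1 + pvVisGo hj rest (some x)
  | x :: rest, some m =>
    if m < x then (if hj ≤ x then 1 else 1 + pvVisGo hj rest (some x))
    else if hj ≤ m then 0 else pvVisGo hj rest (some m)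

def pvVis (line : List Int) (j : Nat) : Int :=
  pvVisGo (PySem.List.pyGetD line (j : Int) 0)
    (PySem.List.slice line (some ((j : Int) + 1)) none) none

def seePeople_alt (heights : List (List Int)) : List (List Int) :=
  let C : Nat := (PySem.List.pyGetD heights 0 []).length
  let rows := heights.map (fun row => PySem.List.slice row none (some (C : Int)))
  let cols := (List.range C).map (fun (j : Nat) => rows.map (fun row => PySem.List.pyGetD row (j : Int) 0))
  (PySem.List.enumerate rows).map
    (fun p => (List.range C).map (fun j => pvVis p.2 j + pvVis (cols.getD j []) p.1.toNat))

-- ===== PRECONDITION & SPEC =====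
-- Pre_ excludes exactly the inputs on which A raises IndexError: the empty list
-- (heights[0]) and inputs with a row shorter than the first row (heights[i][j]).
def Pre_seePeople (heights : List (List Int)) : Prop :=
  heights ≠ [] ∧ ∀ row ∈ heights, (heights.headD []).length ≤ row.length
instance (heights : List (List Int)) : Decidable (Pre_seePeople heights) := by
  unfold Pre_seePeople; infer_instance

def pvWitness_seePeople : List (List Int) := [[4, 2, 1, 1, 3], [1, 5, 1, 2, 2], [3, 3, 4, 1, 2]]

def Spec_seePeople (heights : List (List Int)) (out : List (List Int)) : Prop := out = seePeople_alt heights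
instance (heights : List (List Int)) (out : List (List Int)) : Decidable (Spec_seePeople heights out) := by unfold Spec_seePeople; infer_instance

-- ===== CLAIM (what is proved, stated in full; the proofs are below) =====
def Claim_equal_seePeople : Prop := ∀ (heights : List (List Int)), Dom_seePeople heights → Pre_seePeople heights → Spec_seePeople heights (seePeople heights)

-- ===== LEMMAS AND PROOFS =====

-- `pvRecords s` = the strictly increasing running maxima (records) of s, scanned left to right;
-- this is exactly the value content of A's monotonic stack and exactly the people B's scan counts.
def pvRecords : List Int → List Int
  | [] => []
  | x :: xs => x :: (pvRecords xs).filter (fun y => x < y)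

-- how many records a person of height x sees: all records below x, plus the first blocker if any
def pvFn (x : Int) (r : List Int) : Nat :=
  (r.takeWhile (fun y => decide (y < x))).length +
    (if r.dropWhile (fun y => decide (y < x)) = [] then 0 else 1)

-- the heights val n, val (n+1), …, val (N-1)
def pvSuf (val : Int → Int) (n N : Nat) : List Int :=
  (List.range' n (N - n)).map (fun (u : Nat) => val u)

-- the number of people position t sees along the line val 0 … val (N-1)
def pvCnt (val : Int → Int) (N t : Nat) : Nat :=
  pvFn (val (t : Int)) (pvRecords (pvSuf val (t + 1) N))

theorem pvRecords_sorted (s : List Int) : (pvRecords s).Pairwise (· < ·) := by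
  induction s with
  | nil => simp [pvRecords]
  | cons x xs ih =>
    rw [pvRecords]
    constructor
    · intro y hy
      have := List.of_mem_filter hy
      simpa using this
    · exact List.pairwise_filter.mpr (ih.imp (by tauto))

theorem pvSuf_stop (val : Int → Int) (N : Nat) : pvSuf val N N = [] := by
  simp [pvSuf]

theorem pvSuf_cons (val : Int → Int) {n N : Nat} (h : n < N) :
    pvSuf val n N = val (n : Int) :: pvSuf val (n + 1) N := by
  have hN : N - n = (N - (n+1)) + 1 := by omega
  rw [pvSuf, hN, List.range'_succ]
  simp [pvSuf]

theorem pvPop_eq (val : Int → Int) (bump : List (List Int) → Int → List (List Int)) (j : Int)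
    (st : List Int) (ret : List (List Int)) :
    pvPop val bump j st ret =
      (st.dropWhile (fun t => decide (val t < val j)),
       (fun m => bump m j)^[(st.takeWhile (fun t => decide (val t < val j))).length] ret) := by
  induction st generalizing ret with
  | nil => simp [pvPop]
  | cons t st ih =>
    rw [pvPop]
    by_cases h : val t < val j
    · rw [if_pos h, ih]
      simp only [List.dropWhile_cons, List.takeWhile_cons, h, decide_true]
      simp [Function.iterate_succ_apply]
    · rw [if_neg h]
      simp [h]

theorem pvBody_char (val : Int → Int) (bump : List (List Int) → Int → List (List Int)) (j : Int)
    (ret : List (List Int)) (st : List Int) (hr : (st.map val).Pairwise (· < ·)) :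
    (pvBody val bump (ret, st) j).1 = (fun m => bump m j)^[pvFn (val j) (st.map val)] ret ∧
    ((pvBody val bump (ret, st) j).2).map val =
      val j :: (st.map val).filter (fun y => decide (val j < y)) := by
  have hq : (fun y => decide (y < val j)) ∘ val = fun t => decide (val t < val j) := rfl
  have htw : (st.map val).takeWhile (fun y => decide (y < val j))
      = (st.takeWhile (fun t => decide (val t < val j))).map val := by
    rw [List.takeWhile_map, hq]
  have hdw : (st.map val).dropWhile (fun y => decide (y < val j))
      = (st.dropWhile (fun t => decide (val t < val j))).map val := by
    rw [List.dropWhile_map, hq]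
  have hsplit : st.map val
      = (st.takeWhile (fun t => decide (val t < val j))).map val
        ++ (st.dropWhile (fun t => decide (val t < val j))).map val := by
    rw [← List.map_append, List.takeWhile_append_dropWhile]
  have hA : ∀ y ∈ (st.takeWhile (fun t => decide (val t < val j))).map val, y < val j := by
    intro y hy
    obtain ⟨t, ht, rfl⟩ := List.mem_map.mp hy
    simpa using List.mem_takeWhile_imp ht
  have hfilterA : ((st.takeWhile (fun t => decide (val t < val j))).map val).filter
      (fun y => decide (val j < y)) = [] := by
    rw [List.filter_eq_nil_iff]
    intro a ha
    have := hA a ha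
    simp; omega
  have hdws : ((st.dropWhile (fun t => decide (val t < val j))).map val).Pairwise (· < ·) := by
    refine List.Pairwise.sublist (List.Sublist.map val (List.dropWhile_sublist _)) ?_
    exact hr
  constructor
  · -- ret component
    unfold pvBody
    rw [pvPop_eq]
    simp only
    unfold pvFn
    rw [htw, List.length_map, hdw]
    by_cases hst : st.dropWhile (fun t => decide (val t < val j)) = []
    · rw [hst]
      simp
    · rw [if_neg (show ¬ (st.dropWhile (fun t => decide (val t < val j))).isEmpty = true by
        simp [List.isEmpty_iff, hst]),
        if_neg (show ¬ ((st.dropWhile (fun t => decide (val t < val j))).map val = []) by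
        simp [hst])]
      exact (Function.iterate_succ_apply' (fun m => bump m j) _ ret).symm
  · -- stack component
    unfold pvBody
    rw [pvPop_eq]
    simp only
    rcases hst : st.dropWhile (fun t => decide (val t < val j)) with _ | ⟨t, ts⟩
    · simp only [List.isEmpty_nil, Bool.true_or, if_true, List.map_cons]
      rw [hsplit, List.filter_append, hfilterA, hst]
      simp
    · have hts : ¬ (val t < val j) := by
        have := List.head?_dropWhile_not (fun t => decide (val t < val j)) st
        rw [hst] at this
        simpa using this
      rw [hst] at hdws
      simp only [List.map_cons] at hdws
      have hpw := List.pairwise_cons.mp hdws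
      have hfiltts : (ts.map val).filter (fun y => decide (val j < y)) = ts.map val := by
        rw [List.filter_eq_self]
        intro a ha
        have := hpw.1 a ha
        simp; omega
      have hrest : (st.map val).filter (fun y => decide (val j < y))
          = (((t :: ts).map val).filter (fun y => decide (val j < y))) := by
        rw [hsplit, List.filter_append, hfilterA, hst]
        simp
      by_cases heq : val t = val j
      · rw [if_neg (show ¬ (((t :: ts).isEmpty || !(val ((t :: ts).headD 0) == val j)) = true) by
          simp [heq])]
        rw [hrest]
        simp only [List.map_cons, List.filter_cons]
        simp only [heq, lt_irrefl, decide_false, Bool.false_eq_true, if_false]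
        rw [hfiltts]
      · rw [if_pos (show ((t :: ts).isEmpty || !(val ((t :: ts).headD 0) == val j)) = true by
          simp [heq])]
        rw [hrest]
        simp only [List.map_cons, List.filter_cons]
        have hd : decide (val j < val t) = true := by simp; omega
        rw [hd]
        simp only [if_true]
        rw [hfiltts]

theorem pvFold (val : Int → Int) (bump : List (List Int) → Int → List (List Int)) (N : Nat) :
    ∀ (n : Nat), n ≤ N → ∀ (ret : List (List Int)) (st : List Int),
    st.map val = pvRecords (pvSuf val n N) →
    (((PySem.List.pyRange ((n : Int) - 1) (-1) (-1)).foldl (pvBody val bump) (ret, st)).1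
      = ((List.range n).reverse).foldl
          (fun m (t : Nat) => (fun mm => bump mm (t : Int))^[pvCnt val N t] m) ret)
    ∧ (((PySem.List.pyRange ((n : Int) - 1) (-1) (-1)).foldl (pvBody val bump) (ret, st)).2).map val
        = pvRecords (pvSuf val 0 N) := by
  intro n
  induction n with
  | zero =>
    intro _ ret st hmap
    rw [PySem.List.pyRange_neg_one_eq_nil (by norm_num)]
    refine ⟨rfl, ?_⟩
    simpa using hmap
  | succ n ih =>
    intro hn ret st hmap
    have hcast : ((n + 1 : Nat) : Int) - 1 = (n : Int) := by push_cast; ring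
    rw [hcast, PySem.List.pyRange_neg_one_cons (by omega), List.foldl_cons]
    have hsorted : (st.map val).Pairwise (· < ·) := by
      rw [hmap]; exact pvRecords_sorted _
    obtain ⟨h1, h2⟩ := pvBody_char val bump (n : Int) ret st hsorted
    have hst1 : ((pvBody val bump (ret, st) (n : Int)).2).map val = pvRecords (pvSuf val n N) := by
      rw [h2, pvSuf_cons val (show n < N by omega), pvRecords, hmap]
    obtain ⟨ihA, ihB⟩ := ih (by omega) (pvBody val bump (ret, st) (n : Int)).1
      (pvBody val bump (ret, st) (n : Int)).2 hst1
    refine ⟨?_, ihB⟩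
    rw [ihA, h1, hmap]
    rw [List.range_succ, List.reverse_append]
    simp only [List.reverse_cons, List.reverse_nil, List.nil_append, List.singleton_append,
      List.foldl_cons]
    rfl

theorem pv_iter_modify {α : Type} (f : α → α) (k c : Nat) (l : List α) :
    (fun m => List.modify m k f)^[c] l = l.modify k f^[c] := by
  induction c generalizing l with
  | zero =>
    simp only [Function.iterate_zero, id]
    apply List.ext_getElem
    · simp
    · intro i h1 h2; simp
  | succ c ih =>
    rw [Function.iterate_succ_apply, ih]
    apply List.ext_getElem
    · simp
    · intro i h1 h2
      simp only [List.getElem_modify]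
      split
      · next h => subst h; rw [← Function.iterate_succ_apply]
      · rfl

theorem pv_iter_add (c : Nat) (x : Int) : (fun y : Int => y + 1)^[c] x = x + c := by
  induction c generalizing x with
  | zero => simp
  | succ c ih => rw [Function.iterate_succ_apply, ih]; push_cast; ring

theorem pv_foldl_mod_rev {α : Type} (g : Nat → α → α) :
    ∀ (n : Nat) (l : List α),
    ((List.range n).reverse).foldl (fun acc t => acc.modify t (g t)) l
      = l.mapIdx (fun t x => if t < n then g t x else x) := by
  intro n
  induction n with
  | zero =>
    intro l
    simp only [List.range_zero, List.reverse_nil, List.foldl_nil]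
    apply List.ext_getElem
    · simp
    · intro i h1 h2; simp [List.getElem_mapIdx]
  | succ n ih =>
    intro l
    rw [List.range_succ, List.reverse_append]
    simp only [List.reverse_cons, List.reverse_nil, List.nil_append, List.singleton_append,
      List.foldl_cons]
    rw [ih]
    apply List.ext_getElem
    · simp
    · intro i h1 h2
      simp only [List.getElem_mapIdx, List.getElem_modify]
      split_ifs <;> first | rfl | omega | simp_all

theorem pv_foldl_colpass (R : Nat) (G : Nat → Nat → Int → Int) :
    ∀ (C : Nat) (m : List (List Int)),
    ((List.range C).reverse).foldl
        (fun acc j => acc.mapIdx (fun t row => if t < R then row.modify j (G t j) else row)) m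
      = m.mapIdx (fun t row =>
          if t < R then row.mapIdx (fun k x => if k < C then G t k x else x) else row) := by
  intro C
  induction C with
  | zero =>
    intro m
    simp only [List.range_zero, List.reverse_nil, List.foldl_nil]
    apply List.ext_getElem
    · simp
    · intro i h1 h2
      simp only [List.getElem_mapIdx]
      split
      · apply List.ext_getElem <;> simp [List.getElem_mapIdx]
      · rfl
  | succ C ih =>
    intro m
    rw [List.range_succ, List.reverse_append]
    simp only [List.reverse_cons, List.reverse_nil, List.nil_append, List.singleton_append,
      List.foldl_cons]
    rw [ih]
    apply List.ext_getElem
    · simp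
    · intro i h1 h2
      simp only [List.getElem_mapIdx]
      split
      · apply List.ext_getElem
        · simp
        · intro k k1 k2
          simp only [List.getElem_mapIdx, List.getElem_modify]
          split_ifs <;> first | rfl | omega | simp_all
      · rfl

theorem pvRange_countdown (R : Nat) :
    PySem.List.pyRange ((R : Int) - 1) (-1) (-1) = ((List.range R).reverse).map (fun (k : Nat) => (k : Int)) := by
  induction R with
  | zero => simp [PySem.List.pyRange_neg_one_eq_nil]
  | succ R ih =>
    rw [PySem.List.pyRange_neg_one_cons (by push_cast; omega)]
    have h1 : ((R : Int) + 1) - 1 - 1 = (R : Int) - 1 := by ring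
    push_cast
    rw [h1, ih, List.range_succ]
    simp

theorem pvFn_cons_lt {x y : Int} (r : List Int) (h : y < x) : pvFn x (y :: r) = pvFn x r + 1 := by
  simp [pvFn, h]
  omega

theorem pvFn_cons_ge {x y : Int} (r : List Int) (h : ¬ y < x) : pvFn x (y :: r) = 1 := by
  simp [pvFn, h]

theorem pvFilter_lower {m x : Int} (r : List Int) (h : x ≤ m) :
    ((pvRecords r).filter (fun y => decide (x < y))).filter (fun y => decide (m < y))
      = (pvRecords r).filter (fun y => decide (m < y)) := by
  rw [List.filter_filter]
  apply List.filter_congr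
  intro a _
  by_cases hma : m < a
  · simp [hma]; omega
  · simp [hma]

theorem pvFilter_above {m x : Int} (r : List Int) (h : m < x) :
    ((pvRecords r).filter (fun y => decide (x < y))).filter (fun y => decide (m < y))
      = (pvRecords r).filter (fun y => decide (x < y)) := by
  rw [List.filter_filter]
  apply List.filter_congr
  intro a _
  by_cases hxa : x < a <;> simp [hxa]
  omega

theorem pvVisGo_some (hj : Int) :
    ∀ (s : List Int) (m : Int), m < hj →
      pvVisGo hj s (some m) = (pvFn hj ((pvRecords s).filter (fun y => decide (m < y))) : Int) := by
  intro s
  induction s with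
  | nil => intro m hm; simp [pvVisGo, pvFn]
  | cons x rest ih =>
    intro m hm
    rw [pvRecords]
    by_cases hmx : m < x
    · rw [List.filter_cons_of_pos (by simpa using hmx)]
      by_cases hx : hj ≤ x
      · rw [pvVisGo, if_pos hmx, if_pos hx, pvFn_cons_ge _ (by omega)]
        simp
      · rw [pvVisGo, if_pos hmx, if_neg hx, pvFn_cons_lt _ (by omega)]
        rw [pvFilter_above rest hmx, ih x (by omega)]
        push_cast; ring
    · rw [List.filter_cons_of_neg (by simpa using hmx)]
      rw [pvVisGo, if_neg hmx, if_neg (by omega : ¬ hj ≤ m)]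
      rw [pvFilter_lower rest (by omega), ih m hm]

theorem pvVisGo_none (hj : Int) (s : List Int) :
    pvVisGo hj s none = (pvFn hj (pvRecords s) : Int) := by
  cases s with
  | nil => simp [pvVisGo, pvFn]
  | cons x rest =>
    rw [pvRecords]
    by_cases hx : hj ≤ x
    · rw [pvVisGo, if_pos hx, pvFn_cons_ge _ (by omega)]
      simp
    · rw [pvVisGo, if_neg hx, pvVisGo_some hj rest x (by omega), pvFn_cons_lt _ (by omega)]
      push_cast; ring

theorem pvVis_eq (line : List Int) (j : Nat) :
    pvVis line j = (pvFn (PySem.List.pyGetD line (j : Int) 0) (pvRecords (line.drop (j + 1))) : Int) := by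
  unfold pvVis
  rw [show ((j : Int) + 1) = ((j + 1 : Nat) : Int) by push_cast; ring,
    PySem.List.slice_from_natCast, pvVisGo_none]

theorem pvSuf_eq_drop (v : List Int) (val : Int → Int)
    (h : ∀ (u : Nat) (hu : u < v.length), val (u : Int) = v[u]) (n : Nat) :
    pvSuf val n v.length = v.drop n := by
  apply List.ext_getElem
  · simp [pvSuf]
  · intro k h1 h2
    have hk : n + k < v.length := by simp [pvSuf] at h1; omega
    rw [List.getElem_drop]
    unfold pvSuf
    simp only [List.getElem_map, List.getElem_range']
    rw [show n + 1 * k = n + k by ring, h (n + k) hk]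

theorem pvEnum_length {α : Type} (xs : List α) (s : Int) :
    (PySem.List.enumerate xs s).length = xs.length := by
  induction xs generalizing s with
  | nil => simp [PySem.List.enumerate]
  | cons x xs ih => rw [PySem.List.enumerate_cons]; simp [ih]

theorem pvEnum_getElem {α : Type} (xs : List α) (s : Int) (i : Nat) (h : i < (PySem.List.enumerate xs s).length) :
    (PySem.List.enumerate xs s)[i] = (s + i, xs[i]'(by rw [pvEnum_length] at h; exact h)) := by
  induction xs generalizing s i with
  | nil => simp [PySem.List.enumerate] at h
  | cons x xs ih =>
    simp only [PySem.List.enumerate_cons]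
    cases i with
    | zero => simp
    | succ i =>
      simp only [List.getElem_cons_succ]
      rw [ih]
      push_cast
      rw [Prod.mk.injEq]
      exact ⟨by ring, rfl⟩

theorem pvGet2_eq (hs : List (List Int)) (i t : Nat) (hi : i < hs.length)
    (ht : t < (hs[i]).length) : pvGet2 hs (i : Int) (t : Int) = hs[i][t] := by
  unfold pvGet2
  rw [PySem.List.pyGetD_eq_getElem hs [] (by positivity) (by exact_mod_cast hi)]
  simp only [Int.toNat_natCast]
  rw [PySem.List.pyGetD_eq_getElem _ 0 (by positivity) (by exact_mod_cast ht)]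
  simp

theorem pv_modify_modify {α : Type} (l : List α) (k : Nat) (f g : α → α) :
    (l.modify k f).modify k g = l.modify k (fun x => g (f x)) := by
  apply List.ext_getElem
  · simp
  · intro i h1 h2
    simp only [List.getElem_modify]
    split <;> simp_all

theorem pv_foldl_modify_outer {α : Type} (k : Nat) (g : Nat → α → α) (l : List Nat) :
    ∀ (m : List α), l.foldl (fun acc t => acc.modify k (g t)) m
      = m.modify k (fun row => l.foldl (fun r t => g t r) row) := by
  induction l with
  | nil =>
    intro m
    apply List.ext_getElem <;> simp [List.getElem_modify]
  | cons t ts ih =>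
    intro m
    rw [List.foldl_cons, ih, pv_modify_modify]
    rfl

theorem pvMap_const_pyRange {α : Type} (n : Nat) (x : α) :
    (PySem.List.pyRange 0 (n : Int) 1).map (fun _ => x) = List.replicate n x := by
  rw [PySem.List.pyRange_one, List.map_map]
  have : ((fun (_ : Int) => x) ∘ fun (k : Nat) => (0 : Int) + (k : Int)) = fun _ => x := rfl
  rw [this, List.map_const', List.length_range]
  norm_num

theorem pvHpass (hs : List (List Int)) (M0 : List (List Int)) (R C : Nat) :
    List.foldl (fun (ret : List (List Int)) (i : Int) =>
      (List.foldl (pvBody (fun t => pvGet2 hs i t) (fun m j => pvBumpAt m i j)) (ret, [])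
        (PySem.List.pyRange ((C : Int) - 1) (-1) (-1))).1)
      M0 (PySem.List.pyRange ((R : Int) - 1) (-1) (-1))
    = M0.mapIdx (fun i row => if i < R then
        row.mapIdx (fun t x => if t < C then
          x + (pvCnt (fun t => pvGet2 hs (i : Int) t) C t : Int) else x) else row) := by
  rw [pvRange_countdown R, List.foldl_map]
  have hbody : (fun (x : List (List Int)) (a : Nat) =>
      (List.foldl (pvBody (fun t => pvGet2 hs (a : Int) t) (fun m j => pvBumpAt m (a : Int) j)) (x, [])
        (PySem.List.pyRange ((C : Int) - 1) (-1) (-1))).1)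
      = fun x a => x.modify a (fun row => row.mapIdx (fun t y => if t < C then
          y + (pvCnt (fun t => pvGet2 hs (a : Int) t) C t : Int) else y)) := by
    funext x a
    rw [(pvFold (fun t => pvGet2 hs (a : Int) t) (fun m j => pvBumpAt m (a : Int) j) C C
      le_rfl x [] (by simp [pvSuf_stop, pvRecords])).1]
    have hiter : (fun (m : List (List Int)) (t : Nat) =>
        (fun mm => pvBumpAt mm (a : Int) (t : Int))^[pvCnt (fun t => pvGet2 hs (a : Int) t) C t] m)
        = fun m t => m.modify a (fun row => row.modify t
            (fun y => y + (pvCnt (fun t => pvGet2 hs (a : Int) t) C t : Int))) := by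
      funext m t
      have h1 : (fun mm => pvBumpAt mm (a : Int) (t : Int))
          = fun (mm : List (List Int)) => mm.modify a (fun row => row.modify t (fun y => y + 1)) := by
        funext mm; simp [pvBumpAt]
      rw [h1, pv_iter_modify]
      congr 1
      funext row
      rw [pv_iter_modify]
      congr 1
      funext y
      rw [pv_iter_add]
    rw [hiter, pv_foldl_modify_outer]
    congr 1
    funext row
    rw [pv_foldl_mod_rev]
  rw [hbody, pv_foldl_mod_rev]

theorem pvVpass (hs : List (List Int)) (M1 : List (List Int)) (R C : Nat) :
    List.foldl (fun (ret : List (List Int)) (j : Int) =>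
      (List.foldl (pvBody (fun t => pvGet2 hs t j) (fun m i => pvBumpAt m i j)) (ret, [])
        (PySem.List.pyRange ((R : Int) - 1) (-1) (-1))).1)
      M1 (PySem.List.pyRange ((C : Int) - 1) (-1) (-1))
    = M1.mapIdx (fun t row => if t < R then
        row.mapIdx (fun k x => if k < C then
          x + (pvCnt (fun u => pvGet2 hs u (k : Int)) R t : Int) else x) else row) := by
  rw [pvRange_countdown C, List.foldl_map]
  have hbody : (fun (x : List (List Int)) (a : Nat) =>
      (List.foldl (pvBody (fun t => pvGet2 hs t (a : Int)) (fun m i => pvBumpAt m i (a : Int))) (x, [])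
        (PySem.List.pyRange ((R : Int) - 1) (-1) (-1))).1)
      = fun x a => x.mapIdx (fun t row => if t < R then
          row.modify a (fun y => y + (pvCnt (fun u => pvGet2 hs u (a : Int)) R t : Int)) else row) := by
    funext x a
    rw [(pvFold (fun t => pvGet2 hs t (a : Int)) (fun m i => pvBumpAt m i (a : Int)) R R
      le_rfl x [] (by simp [pvSuf_stop, pvRecords])).1]
    have hiter : (fun (m : List (List Int)) (t : Nat) =>
        (fun mm => pvBumpAt mm (t : Int) (a : Int))^[pvCnt (fun u => pvGet2 hs u (a : Int)) R t] m)
        = fun m t => m.modify t (fun row => row.modify a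
            (fun y => y + (pvCnt (fun u => pvGet2 hs u (a : Int)) R t : Int))) := by
      funext m t
      have h1 : (fun mm => pvBumpAt mm (t : Int) (a : Int))
          = fun (mm : List (List Int)) => mm.modify t (fun row => row.modify a (fun y => y + 1)) := by
        funext mm; simp [pvBumpAt]
      rw [h1, pv_iter_modify]
      congr 1
      funext row
      rw [pv_iter_modify]
      congr 1
      funext y
      rw [pv_iter_add]
    rw [hiter, pv_foldl_mod_rev]
  rw [hbody, pv_foldl_colpass]

-- ===== VERDICT (by name: the statement is the Claim_ definition above) =====
theorem seePeople_spec : Claim_equal_seePeople := by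
  intro hs _hdom hpre
  unfold Spec_seePeople
  obtain ⟨hne, hrect⟩ := hpre
  simp only [seePeople]
  rw [pvMap_const_pyRange, pvMap_const_pyRange]
  rw [pvHpass hs _ hs.length (PySem.List.pyGetD hs 0 []).length]
  rw [pvVpass hs _ hs.length (PySem.List.pyGetD hs 0 []).length]
  have hC : ∀ (i : Nat) (hi : i < hs.length), (PySem.List.pyGetD hs 0 []).length ≤ hs[i].length := by
    intro i hi
    have h00 : PySem.List.pyGetD hs 0 [] = hs.headD [] := by
      cases hs with
      | nil => exact absurd rfl hne
      | cons a l =>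
        rw [PySem.List.pyGetD_eq_getElem _ _ (by norm_num) (by simp)]
        simp
    rw [h00]
    exact hrect hs[i] (List.getElem_mem hi)
  simp only [seePeople_alt, PySem.List.slice_to_natCast]
  apply List.ext_getElem
  · simp
  · intro i h1 h2
    have hi : i < hs.length := by simpa [pvEnum_length] using h2
    simp only [List.getElem_mapIdx, List.getElem_map, List.getElem_replicate]
    rw [pvEnum_getElem _ 0 i (by simpa [pvEnum_length] using hi)]
    simp only [if_pos hi, List.getElem_map]
    apply List.ext_getElem
    · simp
    · intro k k1 k2
      have hk : k < (PySem.List.pyGetD hs 0 []).length := by simpa using k1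
      have hkC : k < hs[i].length := lt_of_lt_of_le hk (hC i hi)
      simp only [List.getElem_mapIdx, List.getElem_map, List.getElem_replicate,
        List.getElem_range, if_pos hk]
      have htonat : ((0 : Int) + (i : Int)).toNat = i := by omega
      rw [htonat]
      have hcol : ((List.range (PySem.List.pyGetD hs 0 []).length).map
          (fun (j : Nat) => (hs.map (fun row => row.take (PySem.List.pyGetD hs 0 []).length)).map
            (fun row => PySem.List.pyGetD row (j : Int) 0))).getD k []
          = (hs.map (fun row => row.take (PySem.List.pyGetD hs 0 []).length)).map
              (fun row => PySem.List.pyGetD row (k : Int) 0) := by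
        rw [List.getD_eq_getElem _ _ (by simpa using hk)]
        simp
      rw [hcol, pvVis_eq, pvVis_eq]
      have htakelen : (hs[i].take (PySem.List.pyGetD hs 0 []).length).length
          = (PySem.List.pyGetD hs 0 []).length := by
        rw [List.length_take]
        have := hC i hi
        omega
      have hgetik : PySem.List.pyGetD (hs[i].take (PySem.List.pyGetD hs 0 []).length) (k : Int) 0
          = hs[i][k] := by
        rw [PySem.List.pyGetD_eq_getElem _ _ (by positivity) (by rw [htakelen]; exact_mod_cast hk)]
        simp only [Int.toNat_natCast]
        exact List.getElem_take
      have htake_at : ∀ (u : Nat) (hu : u < (hs[i].take (PySem.List.pyGetD hs 0 []).length).length),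
          pvGet2 hs (i : Int) (u : Int) = (hs[i].take (PySem.List.pyGetD hs 0 []).length)[u] := by
        intro u hu
        have huC : u < (PySem.List.pyGetD hs 0 []).length := by rwa [htakelen] at hu
        rw [List.getElem_take]
        exact pvGet2_eq hs i u hi (lt_of_lt_of_le huC (hC i hi))
      have hcolmap : ∀ (u : Nat) (hu : u < hs.length),
          ((hs.map (fun row => row.take (PySem.List.pyGetD hs 0 []).length)).map
            (fun row => PySem.List.pyGetD row (k : Int) 0))[u]'(by simpa using hu)
            = pvGet2 hs (u : Int) (k : Int) := by
        intro u hu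
        simp only [List.getElem_map]
        rw [PySem.List.pyGetD_eq_getElem _ _ (by positivity)
          (by rw [show (hs[u].take (PySem.List.pyGetD hs 0 []).length).length
                = (PySem.List.pyGetD hs 0 []).length by rw [List.length_take]; have := hC u hu; omega]
              exact_mod_cast hk)]
        simp only [Int.toNat_natCast]
        rw [List.getElem_take]
        exact (pvGet2_eq hs u k hu (lt_of_lt_of_le hk (hC u hu))).symm
      have hH : pvCnt (fun t => pvGet2 hs (i : Int) t) (PySem.List.pyGetD hs 0 []).length k
          = pvFn (PySem.List.pyGetD (hs[i].take (PySem.List.pyGetD hs 0 []).length) (k : Int) 0)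
              (pvRecords ((hs[i].take (PySem.List.pyGetD hs 0 []).length).drop (k + 1))) := by
        unfold pvCnt
        beta_reduce
        rw [hgetik, pvGet2_eq hs i k hi hkC]
        have hsuf : pvSuf (fun t => pvGet2 hs (i : Int) t) (k + 1)
              (hs[i].take (PySem.List.pyGetD hs 0 []).length).length
            = (hs[i].take (PySem.List.pyGetD hs 0 []).length).drop (k + 1) :=
          pvSuf_eq_drop (hs[i].take (PySem.List.pyGetD hs 0 []).length) _ htake_at (k + 1)
        conv_lhs => rw [← htakelen]
        rw [hsuf]
      have hV : pvCnt (fun u => pvGet2 hs u (k : Int)) hs.length i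
          = pvFn (PySem.List.pyGetD ((hs.map (fun row => row.take (PySem.List.pyGetD hs 0 []).length)).map
                (fun row => PySem.List.pyGetD row (k : Int) 0)) (i : Int) 0)
              (pvRecords (((hs.map (fun row => row.take (PySem.List.pyGetD hs 0 []).length)).map
                (fun row => PySem.List.pyGetD row (k : Int) 0)).drop (i + 1))) := by
        unfold pvCnt
        beta_reduce
        have hhead : PySem.List.pyGetD ((hs.map (fun row => row.take (PySem.List.pyGetD hs 0 []).length)).map
              (fun row => PySem.List.pyGetD row (k : Int) 0)) (i : Int) 0
            = pvGet2 hs (i : Int) (k : Int) := by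
          rw [PySem.List.pyGetD_eq_getElem _ _ (by positivity) (by simp; exact_mod_cast hi)]
          simp only [Int.toNat_natCast]
          exact hcolmap i hi
        rw [hhead]
        have hsuf : pvSuf (fun u => pvGet2 hs u (k : Int)) (i + 1)
              ((hs.map (fun row => row.take (PySem.List.pyGetD hs 0 []).length)).map
                (fun row => PySem.List.pyGetD row (k : Int) 0)).length
            = ((hs.map (fun row => row.take (PySem.List.pyGetD hs 0 []).length)).map
                (fun row => PySem.List.pyGetD row (k : Int) 0)).drop (i + 1) :=
          pvSuf_eq_drop _ _ (fun u hu => (hcolmap u (by simpa using hu)).symm) (i + 1)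
        rw [show hs.length = ((hs.map (fun row => row.take (PySem.List.pyGetD hs 0 []).length)).map
            (fun row => PySem.List.pyGetD row (k : Int) 0)).length by simp, hsuf]
      rw [hH, hV]
      ring
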